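-- pv_equiv track=rewrite | github.com/Ryzhtus/master-thesis | named_entity_recognition/reader_document.py | get_documents_entities
-- ===== SOURCE A (Python) =====
-- import collections
--
-- def get_documents_entities(document, document_tags):
--     counter = collections.Counter()
--
--     for sentence, tags in zip(document, document_tags):
--         sentence_entity = []
--         sentences_entities = []
--         entity = []
--         entity_tags = []
--         entity_ids = []
--         for idx in range(len(sentence)):
--             if tags[idx] != 'O':
--                 entity.append(sentence[idx])
--                 entity_tags.append(tags[idx])
--                 entity_ids.append(idx)
--
--         if entity:
--             sentence_entity.append(entity[0])
--             for idx in range(1, len(entity)):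
--                 if entity_tags[idx][0] == 'B':
--                     sentences_entities.append(sentence_entity)
--                     sentence_entity = [entity[idx]]
--                 else:
--                     sentence_entity.append(entity[idx])
--             sentences_entities.append(sentence_entity)
--
--             sentences_entities = [' '.join(entity) for entity in sentences_entities]
--             for entity in sentences_entities:
--                 counter[entity] += 1
--
--     return counter
-- ===== SOURCE B (Python) =====
-- import collections
--
-- def get_documents_entities(document, document_tags):
--     counter = collections.Counter()
--     for sentence, tags in zip(document, document_tags):
--         current = []
--         for word, tag in zip(sentence, tags):
--             if tag == 'O':
--                 continue
--             if current and tag[0] == 'B':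
--                 counter[' '.join(current)] += 1
--                 current = [word]
--             else:
--                 current.append(word)
--         if current:
--             counter[' '.join(current)] += 1
--     return counter
-- ===== Notes on version B (the rewrite author's own statement) =====
-- stated objective: simpler
-- what changed: Replaces A's three-phase per-sentence pipeline (filter entity tokens into parallel lists, regroup them by re-indexing, then count the joined groups) by a single pass over zip(sentence, tags) that maintains one 'current' entity buffer and flushes it into the counter at each B-tag boundary and at sentence end.
import Mathlib
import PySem

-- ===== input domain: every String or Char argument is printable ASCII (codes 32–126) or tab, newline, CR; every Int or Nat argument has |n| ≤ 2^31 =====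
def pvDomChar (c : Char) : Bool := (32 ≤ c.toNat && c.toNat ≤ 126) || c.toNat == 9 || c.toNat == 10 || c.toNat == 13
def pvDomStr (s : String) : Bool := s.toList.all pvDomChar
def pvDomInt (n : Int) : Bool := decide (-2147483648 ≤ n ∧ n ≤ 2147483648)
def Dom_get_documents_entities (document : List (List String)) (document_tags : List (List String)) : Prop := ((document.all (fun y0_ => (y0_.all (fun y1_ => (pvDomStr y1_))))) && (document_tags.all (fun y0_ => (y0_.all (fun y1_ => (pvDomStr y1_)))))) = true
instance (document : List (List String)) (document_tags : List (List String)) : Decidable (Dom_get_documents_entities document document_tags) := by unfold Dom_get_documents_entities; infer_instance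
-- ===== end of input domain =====

-- B replaces A's per-sentence filter / regroup-by-index / count pipeline by one pass over
-- zip(sentence, tags) with a single 'current' entity buffer, flushed at B-boundaries (simpler).

-- ===== PORT A =====
-- per-sentence body of A's outer loop (tags[idx] / entity_tags[idx] ported with pyGetD:
-- Pre_ guarantees every accessed index is in range, exactly where Python does not raise)
def pvA_sentence (counter : PySem.Dict String Int) (sentence tags : List String) :
    PySem.Dict String Int :=
  let collected : List String × List String × List Int :=
    (PySem.List.pyRange 0 (sentence.length : Int) 1).foldl
      (fun s idx =>
        if PySem.List.pyGetD tags idx "" ≠ "O" then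
          (s.1 ++ [PySem.List.pyGetD sentence idx ""],
           s.2.1 ++ [PySem.List.pyGetD tags idx ""],
           s.2.2 ++ [idx])
        else s)
      ([], [], [])
  let entity := collected.1
  let entity_tags := collected.2.1
  if entity ≠ [] then
    let regrouped : List (List String) × List String :=
      (PySem.List.pyRange 1 (entity.length : Int) 1).foldl
        (fun q idx =>
          if PySem.Str.pyGet? (PySem.List.pyGetD entity_tags idx "") 0 = some 'B' then
            (q.1 ++ [q.2], [PySem.List.pyGetD entity idx ""])
          else
            (q.1, q.2 ++ [PySem.List.pyGetD entity idx ""]))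
        ([], [PySem.List.pyGetD entity 0 ""])
    let sentences_entities :=
      (regrouped.1 ++ [regrouped.2]).map (fun e => PySem.Str.join " " e)
    sentences_entities.foldl (fun c e => c.modify e 0 (· + 1)) counter
  else counter

def get_documents_entities (document : List (List String))
    (document_tags : List (List String)) : List (String × Int) :=
  ((document.zip document_tags).foldl
    (fun c p => pvA_sentence c p.1 p.2) PySem.Dict.empty).items

-- ===== PORT B =====
-- per-sentence body of B's outer loop: one pass, state = (current buffer, counter)
def pvB_sentence (counter : PySem.Dict String Int) (sentence tags : List String) :
    PySem.Dict String Int :=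
  let r : List String × PySem.Dict String Int :=
    (sentence.zip tags).foldl
      (fun st wt =>
        if wt.2 = "O" then st
        else if st.1 ≠ [] ∧ PySem.Str.pyGet? wt.2 0 = some 'B' then
          ([wt.1], st.2.modify (PySem.Str.join " " st.1) 0 (· + 1))
        else (st.1 ++ [wt.1], st.2))
      ([], counter)
  if r.1 ≠ [] then r.2.modify (PySem.Str.join " " r.1) 0 (· + 1) else r.2

def get_documents_entities_alt (document : List (List String))
    (document_tags : List (List String)) : List (String × Int) :=
  ((document.zip document_tags).foldl
    (fun c p => pvB_sentence c p.1 p.2) PySem.Dict.empty).items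

-- ===== PRECONDITION & SPEC =====
-- Pre_ is exactly where Python A returns: for each zipped (sentence, tags) pair, tags must
-- cover the sentence (else tags[idx] raises IndexError) and no empty-string tag may occur at
-- a position preceded by a non-'O' tag (there entity_tags[idx][0] raises IndexError).
def Pre_get_documents_entities (document : List (List String)) (document_tags : List (List String)) : Prop :=
  ∀ p ∈ document.zip document_tags,
    p.1.length ≤ p.2.length ∧
    ∀ j, j < p.1.length → p.2.getD j "" = "" → ∀ k, k < j → p.2.getD k "" = "O"
instance (document : List (List String)) (document_tags : List (List String)) : Decidable (Pre_get_documents_entities document document_tags) := by unfold Pre_get_documents_entities; infer_instance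

def pvWitness_get_documents_entities : List (List String) × List (List String) :=
  ([["John", "Smith", "runs"], ["in", "Paris"]], [["B-PER", "I-PER", "O"], ["O", "B-LOC"]])

def Spec_get_documents_entities (document : List (List String)) (document_tags : List (List String)) (out : List (String × Int)) : Prop := out = get_documents_entities_alt document document_tags
instance (document : List (List String)) (document_tags : List (List String)) (out : List (String × Int)) : Decidable (Spec_get_documents_entities document document_tags out) := by unfold Spec_get_documents_entities; infer_instance

-- ===== CLAIM (what is proved, stated in full; the proofs are below) =====
def Claim_equal_get_documents_entities : Prop := ∀ (document : List (List String)) (document_tags : List (List String)), Dom_get_documents_entities document document_tags → Pre_get_documents_entities document document_tags → Spec_get_documents_entities document document_tags (get_documents_entities document document_tags)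

-- ===== LEMMAS AND PROOFS =====

theorem pv_zip_concat {α β : Type} (x : α) (d : β) :
    ∀ (s : List α) (t : List β), s.length < t.length →
      (s ++ [x]).zip t = s.zip t ++ [(x, t.getD s.length d)] := by
  intro s
  induction s with
  | nil => intro t ht; cases t with
    | nil => simp at ht
    | cons b t' => simp
  | cons a s' ih => intro t ht; cases t with
    | nil => simp at ht
    | cons b t' =>
      simp only [List.cons_append, List.zip_cons_cons, List.length_cons, List.getD_cons_succ]
      rw [ih t' (by simpa using ht)]

theorem pvA_collect_eq (t : List String) :
    ∀ (s : List String), s.length ≤ t.length →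
    ∀ (i1 i2 : List String) (i3 : List Int),
      ((PySem.List.pyRange 0 (s.length : Int) 1).foldl
        (fun st idx =>
          if PySem.List.pyGetD t idx "" ≠ "O" then
            (st.1 ++ [PySem.List.pyGetD s idx ""],
             st.2.1 ++ [PySem.List.pyGetD t idx ""],
             st.2.2 ++ [idx])
          else st)
        (i1, i2, i3)).1
        = i1 ++ ((s.zip t).filter (fun p => p.2 ≠ "O")).map Prod.fst ∧
      ((PySem.List.pyRange 0 (s.length : Int) 1).foldl
        (fun st idx =>
          if PySem.List.pyGetD t idx "" ≠ "O" then
            (st.1 ++ [PySem.List.pyGetD s idx ""],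
             st.2.1 ++ [PySem.List.pyGetD t idx ""],
             st.2.2 ++ [idx])
          else st)
        (i1, i2, i3)).2.1
        = i2 ++ ((s.zip t).filter (fun p => p.2 ≠ "O")).map Prod.snd := by
  intro s
  induction s using List.reverseRecOn with
  | nil =>
    intro _ i1 i2 i3
    constructor <;> simp
  | append_singleton s' x ih =>
    intro h i1 i2 i3
    have hlt : s'.length < t.length := by simp at h; omega
    have hcast : (((s' ++ [x]).length : Nat) : Int) = (s'.length : Int) + 1 := by simp
    rw [hcast, PySem.List.pyRange_one_succ_right (by positivity), List.foldl_append]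
    have hcong :
        (PySem.List.pyRange 0 (s'.length : Int) 1).foldl
          (fun (st : List String × List String × List Int) idx =>
            if PySem.List.pyGetD t idx "" ≠ "O" then
              (st.1 ++ [PySem.List.pyGetD (s' ++ [x]) idx ""],
               st.2.1 ++ [PySem.List.pyGetD t idx ""],
               st.2.2 ++ [idx])
            else st)
          (i1, i2, i3)
        = (PySem.List.pyRange 0 (s'.length : Int) 1).foldl
          (fun (st : List String × List String × List Int) idx =>
            if PySem.List.pyGetD t idx "" ≠ "O" then
              (st.1 ++ [PySem.List.pyGetD s' idx ""],
               st.2.1 ++ [PySem.List.pyGetD t idx ""],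
               st.2.2 ++ [idx])
            else st)
          (i1, i2, i3) := by
      apply PySem.List.foldl_congr_mem
      intro acc idx hidx
      rw [PySem.List.mem_pyRange_one] at hidx
      have h0 : (0:Int) ≤ idx := hidx.1
      have h1 : idx.toNat < s'.length := by omega
      have hgs : (s' ++ [x]).getD idx.toNat "" = s'.getD idx.toNat "" := by
        simp [List.getD_eq_getElem?_getD, List.getElem?_append_left h1]
      rw [PySem.List.pyGetD_of_nonneg (s' ++ [x]) "" h0,
        PySem.List.pyGetD_of_nonneg s' "" h0, hgs]
    rw [hcong, pv_zip_concat x "" s' t hlt]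
    obtain ⟨ih1, ih2⟩ := ih (le_of_lt hlt) i1 i2 i3
    have hgx : PySem.List.pyGetD (s' ++ [x]) (s'.length : Int) "" = x := by
      rw [PySem.List.pyGetD_natCast]; simp [List.getD_eq_getElem?_getD]
    have hgt : PySem.List.pyGetD t (s'.length : Int) "" = t.getD s'.length "" :=
      PySem.List.pyGetD_natCast t s'.length ""
    simp only [List.foldl_cons, List.foldl_nil]
    rw [hgt, hgx]
    by_cases hO : t[s'.length]?.getD "" = "O"
    · rw [if_neg (by simp [List.getD_eq_getElem?_getD, hO])]
      refine ⟨?_, ?_⟩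
      · rw [ih1]; simp [List.filter_append, List.getD_eq_getElem?_getD, hO]
      · rw [ih2]; simp [List.filter_append, List.getD_eq_getElem?_getD, hO]
    · rw [if_pos (by simp [List.getD_eq_getElem?_getD, hO])]
      refine ⟨?_, ?_⟩
      · show _ ++ [x] = _
        rw [ih1]; simp [List.filter_append, List.getD_eq_getElem?_getD, hO]
      · show _ ++ [t.getD s'.length ""] = _
        rw [ih2]; simp [List.filter_append, List.getD_eq_getElem?_getD, hO]

theorem pvA_regroup_eq :
    ∀ (l : List (String × String)) (init : List (List String) × List String),
      (PySem.List.pyRange 1 ((l.map Prod.fst).length : Int) 1).foldl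
        (fun q idx =>
          if PySem.Str.pyGet? (PySem.List.pyGetD (l.map Prod.snd) idx "") 0 = some 'B' then
            (q.1 ++ [q.2], [PySem.List.pyGetD (l.map Prod.fst) idx ""])
          else
            (q.1, q.2 ++ [PySem.List.pyGetD (l.map Prod.fst) idx ""]))
        init
      = (l.drop 1).foldl
          (fun q p =>
            if PySem.Str.pyGet? p.2 0 = some 'B' then (q.1 ++ [q.2], [p.1])
            else (q.1, q.2 ++ [p.1]))
          init := by
  intro l
  induction l using List.reverseRecOn with
  | nil => intro init; simp [PySem.List.pyRange_one_eq_nil]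
  | append_singleton l' p ih =>
    intro init
    rcases hl : l' with _ | ⟨q0, l''⟩
    · simp [PySem.List.pyRange_one_eq_nil (le_refl 1)]
    · rw [← hl]
      have hne : l' ≠ [] := by rw [hl]; simp
      have hpos : 1 ≤ l'.length := by rw [hl]; simp
      have hcast : ((((l' ++ [p]).map Prod.fst).length : Nat) : Int) = ((l'.map Prod.fst).length : Int) + 1 := by simp
      rw [hcast]
      have hpos' : (1:Int) ≤ ((l'.map Prod.fst).length : Int) := by
        simp; omega
      rw [PySem.List.pyRange_one_succ_right hpos', List.foldl_append,
        List.foldl_cons, List.foldl_nil]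
      have hcong :
          (PySem.List.pyRange 1 ((l'.map Prod.fst).length : Int) 1).foldl
            (fun (q : List (List String) × List String) idx =>
              if PySem.Str.pyGet? (PySem.List.pyGetD ((l' ++ [p]).map Prod.snd) idx "") 0 = some 'B' then
                (q.1 ++ [q.2], [PySem.List.pyGetD ((l' ++ [p]).map Prod.fst) idx ""])
              else
                (q.1, q.2 ++ [PySem.List.pyGetD ((l' ++ [p]).map Prod.fst) idx ""]))
            init
          = (PySem.List.pyRange 1 ((l'.map Prod.fst).length : Int) 1).foldl
            (fun (q : List (List String) × List String) idx =>
              if PySem.Str.pyGet? (PySem.List.pyGetD (l'.map Prod.snd) idx "") 0 = some 'B' then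
                (q.1 ++ [q.2], [PySem.List.pyGetD (l'.map Prod.fst) idx ""])
              else
                (q.1, q.2 ++ [PySem.List.pyGetD (l'.map Prod.fst) idx ""]))
            init := by
        apply PySem.List.foldl_congr_mem
        intro acc idx hidx
        rw [PySem.List.mem_pyRange_one] at hidx
        have h0 : (0:Int) ≤ idx := by omega
        have h1 : idx.toNat < (l'.map Prod.fst).length := by
          simp only [List.length_map] at hidx ⊢; omega
        have h2 : idx.toNat < (l'.map Prod.snd).length := by
          simp only [List.length_map] at h1 ⊢; omega
        have hgf : ((l' ++ [p]).map Prod.fst).getD idx.toNat "" = (l'.map Prod.fst).getD idx.toNat "" := by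
          rw [List.map_append]
          simp [List.getD_eq_getElem?_getD, List.getElem?_append_left h1]
        have hgs : ((l' ++ [p]).map Prod.snd).getD idx.toNat "" = (l'.map Prod.snd).getD idx.toNat "" := by
          rw [List.map_append]
          simp [List.getD_eq_getElem?_getD, List.getElem?_append_left h2]
        rw [PySem.List.pyGetD_of_nonneg ((l' ++ [p]).map Prod.fst) "" h0,
          PySem.List.pyGetD_of_nonneg ((l' ++ [p]).map Prod.snd) "" h0,
          PySem.List.pyGetD_of_nonneg (l'.map Prod.fst) "" h0,
          PySem.List.pyGetD_of_nonneg (l'.map Prod.snd) "" h0, hgf, hgs]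
      rw [hcong, ih]
      have hgf : PySem.List.pyGetD ((l' ++ [p]).map Prod.fst) ((l'.map Prod.fst).length : Int) "" = p.1 := by
        rw [PySem.List.pyGetD_natCast, List.map_append]
        simp [List.getD_eq_getElem?_getD]
      have hgs : PySem.List.pyGetD ((l' ++ [p]).map Prod.snd) ((l'.map Prod.fst).length : Int) "" = p.2 := by
        rw [PySem.List.pyGetD_natCast, List.map_append]
        simp [List.getD_eq_getElem?_getD]
      rw [hgf, hgs, List.drop_append_of_le_length hpos, List.foldl_append,
        List.foldl_cons, List.foldl_nil]

theorem pvB_filter_eq :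
    ∀ (l : List (String × String)) (st : List String × PySem.Dict String Int),
      l.foldl
        (fun st wt =>
          if wt.2 = "O" then st
          else if st.1 ≠ [] ∧ PySem.Str.pyGet? wt.2 0 = some 'B' then
            ([wt.1], st.2.modify (PySem.Str.join " " st.1) 0 (· + 1))
          else (st.1 ++ [wt.1], st.2))
        st
      = (l.filter (fun p => p.2 ≠ "O")).foldl
          (fun st wt =>
            if wt.2 = "O" then st
            else if st.1 ≠ [] ∧ PySem.Str.pyGet? wt.2 0 = some 'B' then
              ([wt.1], st.2.modify (PySem.Str.join " " st.1) 0 (· + 1))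
            else (st.1 ++ [wt.1], st.2))
          st := by
  intro l
  induction l with
  | nil => intro st; rfl
  | cons wt l' ih =>
    intro st
    by_cases hO : wt.2 = "O"
    · simp only [List.foldl_cons, List.filter_cons, hO]
      simp only [ne_eq, not_true_eq_false, decide_false]
      exact ih st
    · have hf : List.filter (fun p => decide ¬(p.2 = "O")) (wt :: l')
          = wt :: List.filter (fun p => decide ¬(p.2 = "O")) l' := by
        simp [hO]
      rw [List.foldl_cons, if_neg hO, hf, List.foldl_cons, if_neg hO]
      exact ih _

theorem pvA_group_ne_nil :
    ∀ (l : List (String × String)) (gs : List (List String)) (cur : List String),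
      cur ≠ [] →
      (l.foldl
        (fun q p =>
          if PySem.Str.pyGet? p.2 0 = some 'B' then (q.1 ++ [q.2], [p.1])
          else (q.1, q.2 ++ [p.1]))
        (gs, cur)).2 ≠ [] := by
  intro l
  induction l with
  | nil => intro gs cur h; exact h
  | cons p l' ih =>
    intro gs cur h
    simp only [List.foldl_cons]
    by_cases hB : PySem.Str.pyGet? p.2 0 = some 'B'
    · rw [if_pos hB]; exact ih _ _ (by simp)
    · rw [if_neg hB]; exact ih _ _ (by simp)

theorem pvB_core_eq :
    ∀ (l : List (String × String)), (∀ p ∈ l, p.2 ≠ "O") →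
    ∀ (gs : List (List String)) (cur : List String), cur ≠ [] →
    ∀ (c : PySem.Dict String Int),
      l.foldl
        (fun st wt =>
          if wt.2 = "O" then st
          else if st.1 ≠ [] ∧ PySem.Str.pyGet? wt.2 0 = some 'B' then
            ([wt.1], st.2.modify (PySem.Str.join " " st.1) 0 (· + 1))
          else (st.1 ++ [wt.1], st.2))
        (cur, (gs.map (fun e => PySem.Str.join " " e)).foldl (fun c e => c.modify e 0 (· + 1)) c)
      = ((l.foldl
            (fun q p =>
              if PySem.Str.pyGet? p.2 0 = some 'B' then (q.1 ++ [q.2], [p.1])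
              else (q.1, q.2 ++ [p.1]))
            (gs, cur)).2,
         (((l.foldl
            (fun q p =>
              if PySem.Str.pyGet? p.2 0 = some 'B' then (q.1 ++ [q.2], [p.1])
              else (q.1, q.2 ++ [p.1]))
            (gs, cur)).1.map (fun e => PySem.Str.join " " e)).foldl
            (fun c e => c.modify e 0 (· + 1)) c)) := by
  intro l
  induction l with
  | nil => intro _ gs cur _ c; rfl
  | cons wt l' ih =>
    intro hl gs cur hcur c
    have hO : wt.2 ≠ "O" := hl wt (by simp)
    simp only [List.foldl_cons, if_neg hO]
    by_cases hB : PySem.Str.pyGet? wt.2 0 = some 'B'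
    · rw [if_pos ⟨hcur, hB⟩, if_pos hB]
      have : ((gs.map (fun e => PySem.Str.join " " e)).foldl
          (fun c e => c.modify e 0 (· + 1)) c).modify (PySem.Str.join " " cur) 0 (· + 1)
          = (((gs ++ [cur]).map (fun e => PySem.Str.join " " e)).foldl
              (fun c e => c.modify e 0 (· + 1)) c) := by
        simp [List.foldl_append]
      rw [this]
      exact ih (fun p hp => hl p (by simp [hp])) (gs ++ [cur]) [wt.1] (by simp) c
    · rw [if_neg (by rintro ⟨-, h⟩; exact hB h), if_neg hB]
      exact ih (fun p hp => hl p (by simp [hp])) gs (cur ++ [wt.1]) (by simp) c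

theorem pv_sentence_eq (s t : List String) (h : s.length ≤ t.length)
    (c : PySem.Dict String Int) : pvA_sentence c s t = pvB_sentence c s t := by
  obtain ⟨h1, h2⟩ := pvA_collect_eq t s h [] [] []
  simp only [List.nil_append] at h1 h2
  simp only [pvA_sentence, pvB_sentence]
  rw [h1, h2, pvA_regroup_eq, pvB_filter_eq]
  simp only [ne_eq, decide_not]
  rcases hf : List.filter (fun p => !decide (p.2 = "O")) (s.zip t) with _ | ⟨q, rest⟩
  · rw [hf]; simp
  · have hmem : ∀ p ∈ q :: rest, p.2 ≠ "O" := by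
      rw [← hf]; intro p hp; simpa using List.of_mem_filter hp
    have hq : q.2 ≠ "O" := hmem q (by simp)
    have hrest : ∀ p ∈ rest, p.2 ≠ "O" := fun p hp => hmem p (by simp [hp])
    rw [hf]
    have hA : ¬(List.map Prod.fst (q :: rest) = []) := by simp
    rw [if_pos hA]
    simp only [List.map_cons, PySem.List.pyGetD_zero_cons]
    have hB : ¬(¬([] : List String) = [] ∧ PySem.Str.pyGet? q.2 0 = some 'B') := by
      rintro ⟨hne, -⟩; exact hne rfl
    rw [List.foldl_cons, if_neg hq, if_neg hB]
    rw [show ([] : List String) ++ [q.1] = [q.1] from rfl]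
    have hcore := pvB_core_eq rest hrest [] [q.1] (by simp) c
    simp only [List.map_nil, List.foldl_nil] at hcore
    rw [hcore]
    have hg := pvA_group_ne_nil rest [] [q.1] (by simp)
    rw [if_pos (by simpa using hg)]
    rw [List.map_append, List.foldl_append]
    simp

-- ===== VERDICT (by name: the statement is the Claim_ definition above) =====
theorem get_documents_entities_spec : Claim_equal_get_documents_entities := by
  intro document document_tags _hdom hpre
  unfold Spec_get_documents_entities get_documents_entities get_documents_entities_alt
  congr 1
  apply PySem.List.foldl_congr_mem
  intro c p hp
  exact pv_sentence_eq p.1 p.2 (hpre p hp).1 c
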